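-- pv_equiv track=rewrite | github.com/Aiyane/Pubmed | sort_gene/midsort.py | set_gene
-- ===== SOURCE A (Python) =====
-- def set_gene(genes):
--     """
--     基因去重
--     :param genes:
--     :return:
--     """
--     result = []
--     for g in genes:
--         found = False
--         for k in result:
--             if is_match(g, k):
--                 found = True
--         if not found:
--             result.append(g)
--     return result
--
-- def lcs_dp(input_x, input_y):
--     """
--     最小子串查找
--     :param input_x:
--     :param input_y:
--     :return:
--     """
--     dp = [([0] * len(input_y)) for i in range(len(input_x))]
--     max_len = max_index = 0
--     for i in range(0, len(input_x)):
--         for j in range(0, len(input_y)):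
--             if input_x[i] == input_y[j]:
--                 if i != 0 and j != 0:
--                     dp[i][j] = dp[i - 1][j - 1] + 1
--                 elif i == 0 or j == 0:
--                     dp[i][j] = 1
--                 if dp[i][j] > max_len:
--                     max_len = dp[i][j]
--                     max_index = i + 1 - max_len
--     return input_x[max_index:max_index + max_len]
--
-- def is_match(x, y):
--     if len(x) < 3 or len(y) < 3:
--         return True if x == y else False
--     else:
--         return True if len(lcs_dp(x, y)) >= 3 else False
-- ===== SOURCE B (Python) =====
-- def set_gene(genes):
--     """
--     基因去重 — one pass with a trigram index: a long gene matches iff it shares a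
--     3-char substring with some kept long gene; short genes (<3 chars) match by equality.
--     """
--     result = []
--     trigrams = set()
--     shorts = set()
--     for g in genes:
--         if len(g) < 3:
--             if g not in shorts:
--                 shorts.add(g)
--                 result.append(g)
--         else:
--             tg = {g[i:i + 3] for i in range(len(g) - 2)}
--             if not (tg & trigrams):
--                 trigrams |= tg
--                 result.append(g)
--     return result
-- ===== Notes on version B (the rewrite author's own statement) =====
-- stated objective: faster
-- what changed: Replaced the all-pairs quadratic-per-pair LCS dynamic programming (each new gene runs an O(L^2) DP table against every kept gene) by a single pass that maintains one set of 3-char substrings of all kept long genes (and a set of kept short genes), so each gene is tested by one trigram-set intersection / membership lookup.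
import Mathlib
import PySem

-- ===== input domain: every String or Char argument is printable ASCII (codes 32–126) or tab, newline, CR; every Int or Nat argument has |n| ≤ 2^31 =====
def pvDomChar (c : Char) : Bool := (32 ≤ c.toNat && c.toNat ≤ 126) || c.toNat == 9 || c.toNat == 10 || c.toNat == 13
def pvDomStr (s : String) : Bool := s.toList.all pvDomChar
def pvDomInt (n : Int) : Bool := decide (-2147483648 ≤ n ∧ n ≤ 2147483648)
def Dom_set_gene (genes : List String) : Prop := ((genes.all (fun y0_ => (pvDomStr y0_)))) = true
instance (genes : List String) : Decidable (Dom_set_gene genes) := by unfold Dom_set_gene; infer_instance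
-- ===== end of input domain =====

-- B replaces A's quadratic all-pairs LCS dynamic programming by a single pass that keeps
-- the set of 3-char substrings (and the set of short genes) of everything kept so far.

-- ===== PORT A =====
-- state of lcs_dp's nested loops: (dp matrix, max_len, max_index)
abbrev LcsState := List (List Nat) × Nat × Nat

-- one inner-loop step of lcs_dp (the body for a fixed i and j); indices produced by
-- range(len(..)) are always in bounds, so Python's x[i] is the total getD here.
def lcsStep (x y : List Char) (i : Nat) (st : LcsState) (j : Nat) : LcsState :=
  let dp := st.1
  if x.getD i default = y.getD j default then
    let v : Nat := if i ≠ 0 ∧ j ≠ 0 then (dp.getD (i-1) []).getD (j-1) 0 + 1 else 1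
    let dp' := dp.set i ((dp.getD i []).set j v)
    if v > st.2.1 then (dp', v, i + 1 - v) else (dp', st.2.1, st.2.2)
  else st

def lcs_dp (x y : List Char) : List Char :=
  let dp0 : List (List Nat) := (List.range x.length).map (fun _ => List.replicate y.length 0)
  let st := (List.range x.length).foldl (fun st i =>
      (List.range y.length).foldl (lcsStep x y i) st) (dp0, 0, 0)
  -- input_x[max_index : max_index + max_len] with natural bounds (PySem.List.slice_natCast_add)
  (x.drop st.2.2).take st.2.1

def is_match (x y : String) : Bool :=
  if x.toList.length < 3 ∨ y.toList.length < 3 then x == y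
  else decide (3 ≤ (lcs_dp x.toList y.toList).length)

def set_gene (genes : List String) : List String :=
  genes.foldl (fun result g =>
    let found := result.foldl (fun found k => if is_match g k then true else found) false
    if !found then result ++ [g] else result) []

-- ===== PORT B =====
-- the list [g[i:i+3] for i in range(len(g)-2)]
def triStr (g : String) : List String :=
  (List.range (g.toList.length - 2)).map
    (fun (i : Nat) => PySem.Str.slice g (some (i : Int)) (some ((i : Int) + 3)))

-- state: (result, trigrams, shorts)
def altStep (st : List String × PySem.Set String × PySem.Set String) (g : String) :
    List String × PySem.Set String × PySem.Set String :=
  if g.toList.length < 3 then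
    if !(PySem.Set.contains st.2.2 g) then (st.1 ++ [g], st.2.1, PySem.Set.add st.2.2 g)
    else st
  else
    let tg := PySem.Set.ofList (triStr g)
    if (PySem.Set.inter tg st.2.1).isEmpty then (st.1 ++ [g], PySem.Set.union st.2.1 tg, st.2.2)
    else st

def set_gene_alt (genes : List String) : List String :=
  (genes.foldl altStep ([], PySem.Set.empty, PySem.Set.empty)).1

-- ===== PRECONDITION & SPEC =====
def Spec_set_gene (genes : List String) (out : List String) : Prop := out = set_gene_alt genes
instance (genes : List String) (out : List String) : Decidable (Spec_set_gene genes out) := by unfold Spec_set_gene; infer_instance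

-- ===== CLAIM (what is proved, stated in full; the proofs are below) =====
def Claim_equal_set_gene : Prop := ∀ (genes : List String), Dom_set_gene genes → Spec_set_gene genes (set_gene genes)

-- ===== LEMMAS AND PROOFS =====

-- length of the longest common suffix of x[:i+1] and y[:j+1] (the value dp[i][j] holds)
def csl (x y : List Char) : Nat → Nat → Nat
  | 0, j => if x.getD 0 default = y.getD j default then 1 else 0
  | i+1, 0 => if x.getD (i+1) default = y.getD 0 default then 1 else 0
  | i+1, j+1 => if x.getD (i+1) default = y.getD (j+1) default then csl x y i j + 1 else 0

-- the list of 3-char (char-list) substrings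
def triList (x : List Char) : List (List Char) :=
  (List.range (x.length - 2)).map (fun p => (x.drop p).take 3)

theorem csl_le_left (x y : List Char) (i j : Nat) : csl x y i j ≤ i + 1 := by
  induction i generalizing j with
  | zero => cases j <;> · simp only [csl]; split <;> omega
  | succ i ih =>
    cases j with
    | zero => simp only [csl]; split <;> omega
    | succ j => simp only [csl]; split
                · have := ih j; omega
                · omega

theorem csl_pos_of_eq (x y : List Char) (i j : Nat)
    (h : x.getD i default = y.getD j default) : 1 ≤ csl x y i j := by
  rcases i with _ | i <;> rcases j with _ | j <;> simp only [csl, if_pos h] <;> omega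

-- characterisation of the suffix: every offset below csl matches
theorem csl_spec (x y : List Char) (i j d : Nat) (hd : d < csl x y i j) :
    d ≤ i ∧ d ≤ j ∧ x.getD (i - d) default = y.getD (j - d) default := by
  induction i generalizing j d with
  | zero =>
    rcases j with _ | j <;>
    · simp only [csl] at hd
      split at hd
      · interval_cases d
        exact ⟨le_refl _, Nat.zero_le _, by assumption⟩
      · omega
  | succ i ih =>
    cases j with
    | zero =>
      simp only [csl] at hd
      split at hd
      · interval_cases d
        exact ⟨Nat.zero_le _, le_refl _, by assumption⟩
      · omega
    | succ j =>
      simp only [csl] at hd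
      split at hd
      · rcases d with _ | e
        · exact ⟨Nat.zero_le _, Nat.zero_le _, by simpa using ‹_›⟩
        · have he := ih j e (by omega)
          refine ⟨by omega, by omega, ?_⟩
          have h1 : i + 1 - (e + 1) = i - e := by omega
          have h2 : j + 1 - (e + 1) = j - e := by omega
          rw [h1, h2]; exact he.2.2
      · omega

-- cells of the dp matrix read through getD
def dpGet (dp : List (List Nat)) (a b : Nat) : Nat := (dp.getD a []).getD b 0

-- "cell (a,b) already processed when the loops stand at row i, column j"
def Proc (i j a b : Nat) : Prop := a < i ∨ (a = i ∧ b < j)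

def DpInv (x y : List Char) (i j : Nat) (st : LcsState) : Prop :=
  st.1.length = x.length ∧ (∀ r ∈ st.1, r.length = y.length) ∧
  (∀ a b, a < x.length → b < y.length → Proc i j a b → dpGet st.1 a b = csl x y a b) ∧
  (∀ a b, a < x.length → b < y.length → ¬ Proc i j a b → dpGet st.1 a b = 0) ∧
  (∀ a b, a < x.length → b < y.length → Proc i j a b → csl x y a b ≤ st.2.1) ∧
  ((st.2.1 = 0 ∧ st.2.2 = 0) ∨
    ∃ a b, a < x.length ∧ b < y.length ∧ Proc i j a b ∧ st.2.1 = csl x y a b ∧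
      0 < st.2.1 ∧ st.2.2 = a + 1 - st.2.1)

theorem csl_eq_zero (x y : List Char) (i j : Nat)
    (h : ¬ x.getD i default = y.getD j default) : csl x y i j = 0 := by
  rcases i with _ | i <;> rcases j with _ | j <;> simp only [csl, if_neg h]

theorem csl_succ (x y : List Char) (i j : Nat)
    (h : x.getD (i+1) default = y.getD (j+1) default) :
    csl x y (i+1) (j+1) = csl x y i j + 1 := by
  simp only [csl, if_pos h]

theorem csl_base (x y : List Char) (i j : Nat) (h0 : i = 0 ∨ j = 0)
    (h : x.getD i default = y.getD j default) : csl x y i j = 1 := by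
  rcases i with _ | i <;> rcases j with _ | j <;> simp only [csl, if_pos h] <;> omega

theorem dpGet_set (dp : List (List Nat)) (i j v a b : Nat) (hi : i < dp.length)
    (hj : j < (dp.getD i []).length) :
    dpGet (dp.set i ((dp.getD i []).set j v)) a b
      = if a = i ∧ b = j then v else dpGet dp a b := by
  unfold dpGet
  by_cases ha : a = i
  · subst ha
    rw [(List.getD_eq_getElem?_getD (l := dp.set a ((dp.getD a []).set j v))),
      List.getElem?_set_self (by omega), Option.getD_some]
    by_cases hb : b = j
    · subst hb
      rw [List.getD_eq_getElem?_getD (l := (dp.getD a []).set b v),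
        List.getElem?_set_self (by omega), Option.getD_some, if_pos ⟨rfl, rfl⟩]
    · rw [List.getD_eq_getElem?_getD (l := (dp.getD a []).set j v),
        List.getElem?_set_ne (Ne.symm hb), if_neg (fun h => hb h.2),
        (List.getD_eq_getElem?_getD (l := dp.getD a []))]
  · rw [(List.getD_eq_getElem?_getD (l := dp.set i ((dp.getD i []).set j v))),
      List.getElem?_set_ne (Ne.symm ha), if_neg (fun h => ha h.1),
      List.getD_eq_getElem?_getD (l := dp)]

theorem proc_succ (i j a b : Nat) : Proc i (j+1) a b ↔ Proc i j a b ∨ (a = i ∧ b = j) := by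
  unfold Proc; omega

theorem inv_step (x y : List Char) (i j : Nat) (st : LcsState)
    (hi : i < x.length) (hj : j < y.length) (h : DpInv x y i j st) :
    DpInv x y i (j+1) (lcsStep x y i st j) := by
  obtain ⟨dp, ml, mi⟩ := st
  obtain ⟨hlen, hrows, hproc, hun, hmax, hwit⟩ := h
  simp only at hlen hrows hproc hun hmax hwit
  by_cases hc : x.getD i default = y.getD j default
  · -- characters match: the cell is written
    have hrow : (dp.getD i []).length = y.length := by
      have : dp.getD i [] ∈ dp := by
        rw [List.getD_eq_getElem?_getD]
        rw [List.getElem?_eq_getElem (by omega)]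
        exact List.getElem_mem _
      exact hrows _ this
    set v : Nat := if i ≠ 0 ∧ j ≠ 0 then (dp.getD (i-1) []).getD (j-1) 0 + 1 else 1 with hvdef
    have hv : v = csl x y i j := by
      rw [hvdef]
      by_cases h0 : i ≠ 0 ∧ j ≠ 0
      · rw [if_pos h0]
        have hp : Proc i j (i-1) (j-1) := Or.inl (by omega)
        have hd := hproc (i-1) (j-1) (by omega) (by omega) hp
        unfold dpGet at hd
        rw [hd]
        obtain ⟨i', rfl⟩ := Nat.exists_eq_succ_of_ne_zero h0.1
        obtain ⟨j', rfl⟩ := Nat.exists_eq_succ_of_ne_zero h0.2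
        simp only [Nat.succ_sub_one]
        exact (csl_succ x y i' j' hc).symm
      · rw [if_neg h0]
        exact (csl_base x y i j (by omega) hc).symm
    have hvpos : 0 < v := by
      rw [hvdef]; split <;> omega
    have hget : ∀ a b, dpGet (dp.set i ((dp.getD i []).set j v)) a b
        = if a = i ∧ b = j then v else dpGet dp a b := by
      intro a b
      exact dpGet_set dp i j v a b (by omega) (by omega)
    have hL : (dp.set i ((dp.getD i []).set j v)).length = x.length := by
      simp [hlen]
    have hR : ∀ r ∈ dp.set i ((dp.getD i []).set j v), r.length = y.length := by
      intro r hr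
      rcases List.mem_or_eq_of_mem_set hr with h' | h'
      · exact hrows _ h'
      · rw [h', List.length_set, hrow]
    have hP : ∀ a b, a < x.length → b < y.length → Proc i (j+1) a b →
        dpGet (dp.set i ((dp.getD i []).set j v)) a b = csl x y a b := by
      intro a b ha hb hp
      rw [hget]
      rcases (proc_succ i j a b).mp hp with hp' | hp'
      · rw [if_neg (by unfold Proc at hp'; omega), hproc a b ha hb hp']
      · obtain ⟨rfl, rfl⟩ := hp'
        rw [if_pos ⟨rfl, rfl⟩, hv]
    have hU : ∀ a b, a < x.length → b < y.length → ¬ Proc i (j+1) a b →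
        dpGet (dp.set i ((dp.getD i []).set j v)) a b = 0 := by
      intro a b ha hb hp
      rw [hget, if_neg (by rw [proc_succ] at hp; tauto)]
      exact hun a b ha hb (by rw [proc_succ] at hp; tauto)
    simp only [lcsStep, if_pos hc]
    by_cases hgt : v > ml
    · rw [if_pos hgt]
      refine ⟨hL, hR, hP, hU, ?_, ?_⟩
      · intro a b ha hb hp
        rcases (proc_succ i j a b).mp hp with hp' | hp'
        · have := hmax a b ha hb hp'; simp only; omega
        · obtain ⟨rfl, rfl⟩ := hp'; simp only; omega
      · right
        exact ⟨i, j, hi, hj, (proc_succ i j i j).mpr (Or.inr ⟨rfl, rfl⟩), hv.symm ▸ rfl, hvpos, rfl⟩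
    · rw [if_neg hgt]
      refine ⟨hL, hR, hP, hU, ?_, ?_⟩
      · intro a b ha hb hp
        rcases (proc_succ i j a b).mp hp with hp' | hp'
        · exact hmax a b ha hb hp'
        · obtain ⟨rfl, rfl⟩ := hp'; simp only; omega
      · rcases hwit with ⟨h1, h2⟩ | ⟨a, b, ha, hb, hp, hrest⟩
        · omega
        · exact Or.inr ⟨a, b, ha, hb, (proc_succ i j a b).mpr (Or.inl hp), hrest⟩
  · -- characters differ: state unchanged, csl at the new cell is 0
    simp only [lcsStep, if_neg hc]
    have hz := csl_eq_zero x y i j hc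
    refine ⟨hlen, hrows, ?_, ?_, ?_, ?_⟩
    · intro a b ha hb hp
      rcases (proc_succ i j a b).mp hp with hp' | hp'
      · exact hproc a b ha hb hp'
      · obtain ⟨rfl, rfl⟩ := hp'
        rw [hz]
        exact hun a b ha hb (by unfold Proc; omega)
    · intro a b ha hb hp
      exact hun a b ha hb (fun h' => hp ((proc_succ i j a b).mpr (Or.inl h')))
    · intro a b ha hb hp
      rcases (proc_succ i j a b).mp hp with hp' | hp'
      · exact hmax a b ha hb hp'
      · obtain ⟨rfl, rfl⟩ := hp'; omega
    · rcases hwit with h' | ⟨a, b, ha, hb, hp, hrest⟩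
      · exact Or.inl h'
      · exact Or.inr ⟨a, b, ha, hb, (proc_succ i j a b).mpr (Or.inl hp), hrest⟩

theorem inv_row (x y : List Char) (i : Nat) (hi : i < x.length) (j : Nat) (hj : j ≤ y.length)
    (st : LcsState) (h : DpInv x y i 0 st) :
    DpInv x y i j ((List.range j).foldl (lcsStep x y i) st) := by
  induction j with
  | zero => simpa using h
  | succ j ihj =>
    rw [List.range_succ, List.foldl_append, List.foldl_cons, List.foldl_nil]
    exact inv_step x y i j _ hi (by omega) (ihj (by omega))

theorem inv_init (x y : List Char) :
    DpInv x y 0 0 ((List.range x.length).map (fun _ => List.replicate y.length 0), 0, 0) := by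
  refine ⟨by simp, ?_, ?_, ?_, ?_, Or.inl ⟨rfl, rfl⟩⟩
  · intro r hr
    obtain ⟨_, _, rfl⟩ := List.mem_map.mp hr
    simp
  · intro a b ha hb hp; exact absurd hp (by unfold Proc; omega)
  · intro a b ha hb _
    unfold dpGet
    have h1 : ((List.range x.length).map (fun _ => List.replicate y.length 0)).getD a []
        = List.replicate y.length 0 := by
      rw [List.getD_eq_getElem _ _ (by simpa using ha)]
      simp
    rw [h1, List.getD_eq_getElem _ _ (by simpa using hb)]
    simp
  · intro a b ha hb hp; exact absurd hp (by unfold Proc; omega)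

theorem inv_shift (x y : List Char) (i : Nat) (st : LcsState)
    (h : DpInv x y i y.length st) : DpInv x y (i+1) 0 st := by
  obtain ⟨h1, h2, h3, h4, h5, h6⟩ := h
  have hp : ∀ a b, b < y.length → (Proc (i+1) 0 a b ↔ Proc i y.length a b) := by
    intro a b hb; unfold Proc; omega
  refine ⟨h1, h2, ?_, ?_, ?_, ?_⟩
  · intro a b ha hb hpr; exact h3 a b ha hb ((hp a b hb).mp hpr)
  · intro a b ha hb hpr; exact h4 a b ha hb (fun h' => hpr ((hp a b hb).mpr h'))
  · intro a b ha hb hpr; exact h5 a b ha hb ((hp a b hb).mp hpr)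
  · rcases h6 with h' | ⟨a, b, ha, hb, hpr, hrest⟩
    · exact Or.inl h'
    · exact Or.inr ⟨a, b, ha, hb, (hp a b hb).mpr hpr, hrest⟩

theorem inv_rows (x y : List Char) (i : Nat) (hi : i ≤ x.length) :
    DpInv x y i 0 ((List.range i).foldl (fun st i =>
      (List.range y.length).foldl (lcsStep x y i) st)
      ((List.range x.length).map (fun _ => List.replicate y.length 0), 0, 0)) := by
  induction i with
  | zero => exact inv_init x y
  | succ i ihi =>
    rw [List.range_succ, List.foldl_append, List.foldl_cons, List.foldl_nil]
    exact inv_shift x y i _ (inv_row x y i (by omega) y.length (le_refl _) _ (ihi (by omega)))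

-- the final length of lcs_dp, characterised
theorem lcs_len (x y : List Char) :
    3 ≤ (lcs_dp x y).length ↔ ∃ a b, a < x.length ∧ b < y.length ∧ 3 ≤ csl x y a b := by
  have h := inv_rows x y x.length (le_refl _)
  set F := (List.range x.length).foldl (fun st i =>
      (List.range y.length).foldl (lcsStep x y i) st)
      ((List.range x.length).map (fun _ => List.replicate y.length 0), 0, 0) with hF
  have hd : lcs_dp x y = (x.drop F.2.2).take F.2.1 := rfl
  obtain ⟨-, -, -, -, hmax, hwit⟩ := h
  rw [hd, List.length_take, List.length_drop]
  constructor
  · intro h3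
    rcases hwit with ⟨h0, -⟩ | ⟨a, b, ha, hb, -, heq, -, -⟩
    · omega
    · exact ⟨a, b, ha, hb, by omega⟩
  · rintro ⟨a, b, ha, hb, h3⟩
    have hle := hmax a b ha hb (Or.inl ha)
    rcases hwit with ⟨h0, -⟩ | ⟨a0, b0, ha0, hb0, -, heq, hpos, hmi⟩
    · omega
    · have := csl_le_left x y a0 b0
      omega

theorem tri_mem (x : List Char) (p : Nat) (hp : p + 2 < x.length) :
    (x.drop p).take 3 ∈ triList x :=
  List.mem_map.mpr ⟨p, List.mem_range.mpr (by omega), rfl⟩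

theorem take3_eq (x : List Char) (p : Nat) (hp : p + 2 < x.length) :
    (x.drop p).take 3 = [x.getD p default, x.getD (p+1) default, x.getD (p+2) default] := by
  apply List.ext_getElem
  · simp; omega
  · intro k h1 h2
    simp only [List.length_take, List.length_drop] at h1
    have hk : k < 3 := by omega
    simp only [List.getElem_take, List.getElem_drop]
    interval_cases k
    · simp only [Nat.add_zero, List.getElem_cons_zero]
      exact (List.getD_eq_getElem _ _ (by omega)).symm
    · simp only [List.getElem_cons_succ, List.getElem_cons_zero]
      exact (List.getD_eq_getElem _ _ (by omega)).symm
    · simp only [List.getElem_cons_succ, List.getElem_cons_zero]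
      exact (List.getD_eq_getElem _ _ (by omega)).symm

theorem csl_iff_tri (x y : List Char) :
    (∃ a b, a < x.length ∧ b < y.length ∧ 3 ≤ csl x y a b) ↔
      ∃ t, t ∈ triList x ∧ t ∈ triList y := by
  constructor
  · rintro ⟨a, b, ha, hb, h3⟩
    obtain ⟨h2a, h2b, e2⟩ := csl_spec x y a b 2 (by omega)
    obtain ⟨-, -, e1⟩ := csl_spec x y a b 1 (by omega)
    obtain ⟨-, -, e0⟩ := csl_spec x y a b 0 (by omega)
    refine ⟨(x.drop (a-2)).take 3, tri_mem x (a-2) (by omega), ?_⟩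
    have hxy : (x.drop (a-2)).take 3 = (y.drop (b-2)).take 3 := by
      rw [take3_eq x (a-2) (by omega), take3_eq y (b-2) (by omega)]
      have c0 : x.getD (a-2) default = y.getD (b-2) default := e2
      have c1 : x.getD (a-2+1) default = y.getD (b-2+1) default := by
        rw [show a-2+1 = a-1 from by omega, show b-2+1 = b-1 from by omega]; exact e1
      have c2 : x.getD (a-2+2) default = y.getD (b-2+2) default := by
        rw [show a-2+2 = a-0 from by omega, show b-2+2 = b-0 from by omega]; exact e0
      rw [c0, c1, c2]
    exact hxy ▸ tri_mem y (b-2) (by omega)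
  · rintro ⟨t, htx, hty⟩
    obtain ⟨p, hp, rfl⟩ := List.mem_map.mp htx
    obtain ⟨q, hq, heq⟩ := List.mem_map.mp hty
    rw [List.mem_range] at hp hq
    rw [take3_eq x p (by omega), take3_eq y q (by omega)] at heq
    simp only [List.cons.injEq, and_true] at heq
    obtain ⟨g0, g1, g2⟩ := heq
    refine ⟨p+2, q+2, by omega, by omega, ?_⟩
    have h1 : csl x y (p+2) (q+2) = csl x y (p+1) (q+1) + 1 :=
      csl_succ x y (p+1) (q+1) g2.symm
    have h2 : csl x y (p+1) (q+1) = csl x y p q + 1 := csl_succ x y p q g1.symm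
    have h3 := csl_pos_of_eq x y p q g0.symm
    omega

theorem triStr_toList (g : String) : (triStr g).map String.toList = triList g.toList := by
  unfold triStr triList
  rw [List.map_map]
  apply List.map_congr_left
  intro i _
  show (PySem.Str.slice g (some (i : Int)) (some ((i : Int) + 3))).toList = _
  rw [PySem.Str.toList_slice]
  have h3 : ((i : Int) + 3) = ((i : Int) + ((3 : Nat) : Int)) := by norm_num
  rw [h3]
  exact PySem.List.slice_natCast_add g.toList i 3

theorem mem_triStr (g : String) (t : String) :
    t ∈ triStr g ↔ t.toList ∈ triList g.toList := by
  rw [← triStr_toList]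
  constructor
  · exact fun h => List.mem_map_of_mem h
  · intro h
    obtain ⟨s, hs, he⟩ := List.mem_map.mp h
    exact (String.toList_inj.mp he) ▸ hs

theorem is_match_long (x y : String) (hx : 3 ≤ x.toList.length) (hy : 3 ≤ y.toList.length) :
    is_match x y = true ↔ ∃ t, t ∈ triStr x ∧ t ∈ triStr y := by
  unfold is_match
  rw [if_neg (by omega), decide_eq_true_iff, lcs_len, csl_iff_tri]
  constructor
  · rintro ⟨t, htx, hty⟩
    refine ⟨String.ofList t, ?_, ?_⟩ <;> rw [mem_triStr] <;> simpa
  · rintro ⟨t, htx, hty⟩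
    exact ⟨t.toList, (mem_triStr x t).mp htx, (mem_triStr y t).mp hty⟩

-- the top-level invariant tying A's accumulated result to B's three components
def TopInv (res : List String) (trig shorts : PySem.Set String) : Prop :=
  (∀ s : String, s ∈ shorts ↔ s ∈ res ∧ s.toList.length < 3) ∧
  (∀ t : String, t ∈ trig ↔ ∃ k ∈ res, 3 ≤ k.toList.length ∧ t ∈ triStr k)

theorem top_step (res : List String) (trig shorts : PySem.Set String) (g : String)
    (h : TopInv res trig shorts) :
    (let found := res.foldl (fun found k => if is_match g k then true else found) false
     if !found then res ++ [g] else res) = (altStep (res, trig, shorts) g).1 ∧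
    TopInv (altStep (res, trig, shorts) g).1 (altStep (res, trig, shorts) g).2.1
      (altStep (res, trig, shorts) g).2.2 := by
  obtain ⟨hsh, htr⟩ := h
  simp only [PySem.List.foldl_if_true_eq (is_match g) res false, Bool.false_or]
  by_cases hlen : g.toList.length < 3
  · -- short gene: A tests equality against every kept gene, B tests membership in `shorts`
    have hany : res.any (is_match g) = PySem.Set.contains shorts g := by
      by_cases hg : g ∈ res
      · rw [List.any_eq_true.mpr ⟨g, hg, by unfold is_match; rw [if_pos (Or.inl hlen)]; simp⟩]
        exact ((PySem.Set.contains_iff shorts g).mpr ((hsh g).mpr ⟨hg, hlen⟩)).symm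
      · have h1 : res.any (is_match g) = false := by
          rw [List.any_eq_false]
          intro k hk
          unfold is_match
          rw [if_pos (Or.inl hlen)]
          simp only [beq_iff_eq]
          intro hgk
          exact hg (hgk ▸ hk)
        have h2 : PySem.Set.contains shorts g = false := by
          rw [Bool.eq_false_iff]
          intro hc
          exact hg ((hsh g).mp ((PySem.Set.contains_iff shorts g).mp hc)).1
        rw [h1, h2]
    simp only [altStep, if_pos hlen, hany]
    by_cases hc : PySem.Set.contains shorts g
    · simp only [hc, Bool.not_true, Bool.false_eq_true, if_false]
      exact ⟨trivial, hsh, htr⟩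
    · rw [Bool.not_eq_true] at hc
      simp only [hc, Bool.not_false, if_true]
      refine ⟨trivial, ?_, ?_⟩
      · intro s
        rw [PySem.Set.mem_add]
        simp only [List.mem_append, List.mem_singleton]
        constructor
        · rintro (hs | rfl)
          · obtain ⟨h1, h2⟩ := (hsh s).mp hs
            exact ⟨Or.inl h1, h2⟩
          · exact ⟨Or.inr rfl, hlen⟩
        · rintro ⟨hs | rfl, h2⟩
          · exact Or.inl ((hsh s).mpr ⟨hs, h2⟩)
          · exact Or.inr rfl
      · intro t
        rw [htr t]
        constructor
        · rintro ⟨k, hk, hrest⟩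
          exact ⟨k, List.mem_append_left _ hk, hrest⟩
        · rintro ⟨k, hk, h3, ht⟩
          rcases List.mem_append.mp hk with hk | hk
          · exact ⟨k, hk, h3, ht⟩
          · rw [List.mem_singleton] at hk; subst hk; omega
  · -- long gene: A runs the LCS test against every kept gene, B intersects trigram sets
    have hmatch : ∀ k, k ∈ res →
        (is_match g k = true ↔ 3 ≤ k.toList.length ∧ ∃ t, t ∈ triStr g ∧ t ∈ triStr k) := by
      intro k hk
      by_cases hk3 : k.toList.length < 3
      · unfold is_match
        rw [if_pos (Or.inr hk3)]
        simp only [beq_iff_eq]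
        constructor
        · intro hgk; subst hgk; omega
        · rintro ⟨h1, -⟩; omega
      · rw [is_match_long g k (by omega) (by omega)]
        exact ⟨fun ht => ⟨by omega, ht⟩, fun ⟨_, ht⟩ => ht⟩
    have hiff : res.any (is_match g) = true ↔
        ∃ t, t ∈ PySem.Set.inter (PySem.Set.ofList (triStr g)) trig := by
      rw [List.any_eq_true]
      constructor
      · rintro ⟨k, hk, hm⟩
        obtain ⟨hk3, t, htg, htk⟩ := (hmatch k hk).mp hm
        exact ⟨t, (PySem.Set.mem_inter _ _ t).mpr
          ⟨(PySem.Set.mem_ofList _ t).mpr htg, (htr t).mpr ⟨k, hk, hk3, htk⟩⟩⟩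
      · rintro ⟨t, hti⟩
        obtain ⟨h1, h2⟩ := (PySem.Set.mem_inter _ _ t).mp hti
        obtain ⟨k, hk, hk3, htk⟩ := (htr t).mp h2
        exact ⟨k, hk, (hmatch k hk).mpr ⟨hk3, t, (PySem.Set.mem_ofList _ t).mp h1, htk⟩⟩
    have hany : res.any (is_match g)
        = !(PySem.Set.inter (PySem.Set.ofList (triStr g)) trig).isEmpty := by
      cases he : (PySem.Set.inter (PySem.Set.ofList (triStr g)) trig).isEmpty
      · simp only [Bool.not_false]
        rcases List.isEmpty_eq_false_iff_exists_mem.mp he with ⟨t, ht⟩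
        exact hiff.mpr ⟨t, ht⟩
      · simp only [Bool.not_true]
        rw [Bool.eq_false_iff]
        intro hc
        obtain ⟨t, ht⟩ := hiff.mp hc
        rw [List.isEmpty_iff] at he
        rw [he] at ht
        exact absurd ht (List.not_mem_nil)
    simp only [altStep, if_neg hlen, hany, Bool.not_not]
    by_cases he : (PySem.Set.inter (PySem.Set.ofList (triStr g)) trig).isEmpty
    · simp only [he, if_true]
      refine ⟨trivial, ?_, ?_⟩
      · intro s
        rw [hsh s]
        simp only [List.mem_append, List.mem_singleton]
        constructor
        · rintro ⟨h1, h2⟩; exact ⟨Or.inl h1, h2⟩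
        · rintro ⟨hs | rfl, h2⟩
          · exact ⟨hs, h2⟩
          · omega
      · intro t
        rw [PySem.Set.mem_union]
        constructor
        · rintro (ht | ht)
          · obtain ⟨k, hk, hrest⟩ := (htr t).mp ht
            exact ⟨k, List.mem_append_left _ hk, hrest⟩
          · exact ⟨g, List.mem_append_right _ (List.mem_singleton.mpr rfl), by omega,
              (PySem.Set.mem_ofList _ t).mp ht⟩
        · rintro ⟨k, hk, h3, ht⟩
          rcases List.mem_append.mp hk with hk | hk
          · exact Or.inl ((htr t).mpr ⟨k, hk, h3, ht⟩)
          · rw [List.mem_singleton] at hk; subst hk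
            exact Or.inr ((PySem.Set.mem_ofList _ t).mpr ht)
    · rw [Bool.not_eq_true] at he
      simp only [he, Bool.false_eq_true, if_false]
      exact ⟨trivial, hsh, htr⟩

theorem top_fold (genes : List String) (res : List String) (trig shorts : PySem.Set String)
    (h : TopInv res trig shorts) :
    genes.foldl (fun result g =>
      let found := result.foldl (fun found k => if is_match g k then true else found) false
      if !found then result ++ [g] else result) res
    = (genes.foldl altStep (res, trig, shorts)).1 := by
  induction genes generalizing res trig shorts with
  | nil => rfl
  | cons g gs ih =>
    simp only [List.foldl_cons]
    obtain ⟨heq, hinv⟩ := top_step res trig shorts g h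
    rw [heq]
    exact ih _ _ _ hinv

-- ===== VERDICT (by name: the statement is the Claim_ definition above) =====
theorem set_gene_spec : Claim_equal_set_gene := by
  intro genes _
  show set_gene genes = set_gene_alt genes
  unfold set_gene set_gene_alt
  exact top_fold genes [] PySem.Set.empty PySem.Set.empty
    ⟨fun s => by simp [PySem.Set.empty], fun t => by simp [PySem.Set.empty]⟩
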